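-- pv_equiv track=rewrite | github.com/CinnamonSlayer/YaDc | src/pss_training.py | _get_key_for_training_sort
-- ===== SOURCE A (Python) =====
-- TRAINING_DESIGN_KEY_NAME = 'TrainingDesignId'
--
-- def _get_key_for_training_sort(training_info: dict, training_designs_data: dict) -> str:
--     result = ''
--     parent_infos = _get_parents(training_info, training_designs_data)
--     if parent_infos:
--         for parent_info in parent_infos:
--             result += parent_info[TRAINING_DESIGN_KEY_NAME].zfill(4)
--     result += training_info[TRAINING_DESIGN_KEY_NAME].zfill(4)
--     return result
--
-- def _get_parents(training_info: dict, training_designs_data: dict) -> list: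
--     parent_training_design_id = training_info['RequiredTrainingDesignId']
--     if parent_training_design_id == '0':
--         parent_training_design_id = None
--
--     if parent_training_design_id is not None:
--         parent_info = training_designs_data[parent_training_design_id]
--         result = _get_parents(parent_info, training_designs_data)
--         result.append(parent_info)
--         return result
--     else:
--         return []
-- ===== SOURCE B (Python) =====
-- TRAINING_DESIGN_KEY_NAME = 'TrainingDesignId'
--
-- def _get_key_for_training_sort(training_info: dict, training_designs_data: dict) -> str:
--     ids = []
--     node = training_info
--     while True:
--         ids.append(node[TRAINING_DESIGN_KEY_NAME])
--         required_id = node['RequiredTrainingDesignId']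
--         if required_id == '0':
--             break
--         node = training_designs_data[required_id]
--     return ''.join(i.zfill(4) for i in reversed(ids))
-- ===== Notes on version B (the rewrite author's own statement) =====
-- stated objective: simpler
-- what changed: Replaces the recursive _get_parents helper (which builds a list of parent dicts and then folds their ids) by a single iterative walk up the parent chain that collects ids and joins their reverse, with no recursion and no intermediate list of dicts.
import Mathlib
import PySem

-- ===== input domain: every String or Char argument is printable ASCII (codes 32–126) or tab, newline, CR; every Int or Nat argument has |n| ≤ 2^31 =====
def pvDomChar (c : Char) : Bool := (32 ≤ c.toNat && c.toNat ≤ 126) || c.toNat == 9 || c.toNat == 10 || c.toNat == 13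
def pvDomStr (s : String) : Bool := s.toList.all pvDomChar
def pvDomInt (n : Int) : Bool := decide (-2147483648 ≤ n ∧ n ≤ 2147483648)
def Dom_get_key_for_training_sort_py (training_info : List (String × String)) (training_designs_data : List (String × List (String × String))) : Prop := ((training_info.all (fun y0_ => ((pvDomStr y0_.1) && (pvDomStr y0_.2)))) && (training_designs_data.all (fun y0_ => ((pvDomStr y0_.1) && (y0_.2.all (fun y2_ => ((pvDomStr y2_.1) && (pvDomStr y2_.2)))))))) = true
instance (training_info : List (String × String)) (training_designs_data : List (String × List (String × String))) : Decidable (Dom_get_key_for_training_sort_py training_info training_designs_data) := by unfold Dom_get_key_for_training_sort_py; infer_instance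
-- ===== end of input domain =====

-- B replaces the recursive parent-list helper by an iterative walk that collects ids and joins their reverse (objective: simpler).

-- ===== PORT A =====
-- _get_parents, with a fuel guard for totality only (Pre_ guarantees the chain
-- ends within training_designs_data.length parent steps; outside Pre_ the Python raises).
def pvParentsA (fuel : Nat) (training_info : List (String × String)) (training_designs_data : List (String × List (String × String))) : List (List (String × String)) :=
  let pid := (List.lookup "RequiredTrainingDesignId" training_info).getD ""
  if pid == "0" then []
  else
    match fuel with
    | 0 => []
    | f + 1 =>
      let pinfo := (List.lookup pid training_designs_data).getD []
      pvParentsA f pinfo training_designs_data ++ [pinfo]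

def get_key_for_training_sort_py (training_info : List (String × String)) (training_designs_data : List (String × List (String × String))) : String :=
  let parent_infos := pvParentsA training_designs_data.length training_info training_designs_data
  let result := parent_infos.foldl (fun acc p => acc ++ PySem.Str.zfill ((List.lookup "TrainingDesignId" p).getD "") 4) ""
  result ++ PySem.Str.zfill ((List.lookup "TrainingDesignId" training_info).getD "") 4

-- ===== PORT B =====
-- the iterative while-loop collecting ids, as fuel recursion (fuel for totality only)
def pvIdsB (fuel : Nat) (node : List (String × String)) (training_designs_data : List (String × List (String × String))) : List String :=
  let id := (List.lookup "TrainingDesignId" node).getD ""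
  let rid := (List.lookup "RequiredTrainingDesignId" node).getD ""
  if rid == "0" then [id]
  else
    match fuel with
    | 0 => [id]
    | f + 1 => id :: pvIdsB f ((List.lookup rid training_designs_data).getD []) training_designs_data

def get_key_for_training_sort_py_alt (training_info : List (String × String)) (training_designs_data : List (String × List (String × String))) : String :=
  (((pvIdsB training_designs_data.length training_info training_designs_data).reverse.map (fun i => PySem.Str.zfill i 4)).foldl (· ++ ·) "")

-- ===== PRECONDITION & SPEC =====
-- Pre_ holds exactly where the Python A returns: both keys are present on every node of the
-- parent chain, every required parent id is a key of training_designs_data, and the chain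
-- reaches '0' (a chain that does not repeat a node has at most |training_designs_data| parent
-- steps; a repeating chain makes A recurse forever, i.e. raise RecursionError).
def pvChainOk (fuel : Nat) (node : List (String × String)) (training_designs_data : List (String × List (String × String))) : Bool :=
  (List.lookup "TrainingDesignId" node).isSome &&
  match List.lookup "RequiredTrainingDesignId" node with
  | none => false
  | some rid =>
    if rid == "0" then true
    else
      match fuel, List.lookup rid training_designs_data with
      | _, none => false
      | 0, some _ => false
      | f + 1, some p => pvChainOk f p training_designs_data

def Pre_get_key_for_training_sort_py (training_info : List (String × String)) (training_designs_data : List (String × List (String × String))) : Prop :=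
  pvChainOk training_designs_data.length training_info training_designs_data = true
instance (training_info : List (String × String)) (training_designs_data : List (String × List (String × String))) : Decidable (Pre_get_key_for_training_sort_py training_info training_designs_data) := by unfold Pre_get_key_for_training_sort_py; infer_instance

def pvWitness_get_key_for_training_sort_py : (List (String × String)) × (List (String × List (String × String))) :=
  ([("TrainingDesignId", "2"), ("RequiredTrainingDesignId", "1")],
   [("1", [("TrainingDesignId", "1"), ("RequiredTrainingDesignId", "0")])])

def Spec_get_key_for_training_sort_py (training_info : List (String × String)) (training_designs_data : List (String × List (String × String))) (out : String) : Prop := out = get_key_for_training_sort_py_alt training_info training_designs_data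
instance (training_info : List (String × String)) (training_designs_data : List (String × List (String × String))) (out : String) : Decidable (Spec_get_key_for_training_sort_py training_info training_designs_data out) := by unfold Spec_get_key_for_training_sort_py; infer_instance

-- ===== CLAIM (what is proved, stated in full; the proofs are below) =====
def Claim_equal_get_key_for_training_sort_py : Prop := ∀ (training_info : List (String × String)) (training_designs_data : List (String × List (String × String))), Dom_get_key_for_training_sort_py training_info training_designs_data → Pre_get_key_for_training_sort_py training_info training_designs_data → Spec_get_key_for_training_sort_py training_info training_designs_data (get_key_for_training_sort_py training_info training_designs_data)

-- ===== LEMMAS AND PROOFS =====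

theorem pv_str_append_assoc (a b c : String) : a ++ b ++ c = a ++ (b ++ c) := by
  apply String.ext
  simp [List.append_assoc]

theorem pv_str_empty_append (a : String) : "" ++ a = a := by
  apply String.ext
  simp

theorem pv_foldA_append (l : List (List (String × String))) (a : String) :
    l.foldl (fun acc p => acc ++ PySem.Str.zfill ((List.lookup "TrainingDesignId" p).getD "") 4) a
      = a ++ l.foldl (fun acc p => acc ++ PySem.Str.zfill ((List.lookup "TrainingDesignId" p).getD "") 4) "" := by
  induction l generalizing a with
  | nil => simp [List.foldl]
  | cons x xs ih =>
    simp only [List.foldl]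
    rw [ih, ih (_ ++ _), pv_str_empty_append, pv_str_append_assoc]

theorem pv_foldB_append (l : List String) (a : String) :
    l.foldl (· ++ ·) a = a ++ l.foldl (· ++ ·) "" := by
  induction l generalizing a with
  | nil => simp [List.foldl]
  | cons x xs ih =>
    simp only [List.foldl]
    rw [ih, ih ("" ++ x), pv_str_empty_append, pv_str_append_assoc]

-- core: A's fold over the parents plus its own id equals B's joined reversed id list, same fuel
theorem pv_core (d : List (String × List (String × String))) :
    ∀ (f : Nat) (ti : List (String × String)),
      (pvParentsA f ti d).foldl (fun acc p => acc ++ PySem.Str.zfill ((List.lookup "TrainingDesignId" p).getD "") 4) ""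
          ++ PySem.Str.zfill ((List.lookup "TrainingDesignId" ti).getD "") 4
        = ((pvIdsB f ti d).reverse.map (fun i => PySem.Str.zfill i 4)).foldl (· ++ ·) "" := by
  intro f
  induction f with
  | zero =>
    intro ti
    simp only [pvParentsA, pvIdsB]
    split
    · simp [List.foldl]
    · simp [List.foldl]
  | succ f ih =>
    intro ti
    simp only [pvParentsA, pvIdsB]
    split
    · simp [List.foldl]
    · rw [List.foldl_append]
      simp only [List.foldl, List.reverse_cons, List.map_append, List.map_cons, List.map_nil]
      rw [List.foldl_append]
      simp only [List.foldl]
      rw [pv_foldA_append, pv_foldB_append, pv_str_empty_append, pv_str_empty_append, ih]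

-- ===== VERDICT (by name: the statement is the Claim_ definition above) =====
theorem get_key_for_training_sort_py_spec : Claim_equal_get_key_for_training_sort_py := by
  intro ti d _ _
  unfold Spec_get_key_for_training_sort_py get_key_for_training_sort_py get_key_for_training_sort_py_alt
  exact pv_core d d.length ti
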